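-- pv_equiv track=rewrite | github.com/ricardoborenstein/-scripts-scylla-sa-testing-framework | environments/benchmark/configure_stress_profile.py | distribute_operations
-- ===== SOURCE A (Python) =====
-- def distribute_operations(read_ratio, queries):
--     operations = {query: 1 for query in queries}  # Start with 1 operation per query
--     total_assigned_ops = len(queries)  # One operation per query initially assigned
--     additional_ops = read_ratio - total_assigned_ops
--
--     # Distribute remaining operations based on the ratio
--     while additional_ops > 0:
--         for query in queries:
--             if additional_ops <= 0:
--                 break
--             operations[query] += 1
--             additional_ops -= 1
--
--     return operations
-- ===== SOURCE B (Python) =====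
-- def distribute_operations(read_ratio, queries):
--     n = len(queries)
--     ops = {}
--     if n == 0:
--         return ops
--     extra = read_ratio - n
--     q, r = divmod(extra, n) if extra > 0 else (0, 0)
--     for i, query in enumerate(queries):
--         ops[query] = ops.get(query, 1) + q + (1 if i < r else 0)
--     return ops
-- ===== Notes on version B (the rewrite author's own statement) =====
-- stated objective: alternative
-- what changed: B replaces A's round-robin while/for loop (one dict increment per distributed operation) by a single enumerate pass that computes each position's share in closed form with divmod(extra, n).
import Mathlib
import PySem

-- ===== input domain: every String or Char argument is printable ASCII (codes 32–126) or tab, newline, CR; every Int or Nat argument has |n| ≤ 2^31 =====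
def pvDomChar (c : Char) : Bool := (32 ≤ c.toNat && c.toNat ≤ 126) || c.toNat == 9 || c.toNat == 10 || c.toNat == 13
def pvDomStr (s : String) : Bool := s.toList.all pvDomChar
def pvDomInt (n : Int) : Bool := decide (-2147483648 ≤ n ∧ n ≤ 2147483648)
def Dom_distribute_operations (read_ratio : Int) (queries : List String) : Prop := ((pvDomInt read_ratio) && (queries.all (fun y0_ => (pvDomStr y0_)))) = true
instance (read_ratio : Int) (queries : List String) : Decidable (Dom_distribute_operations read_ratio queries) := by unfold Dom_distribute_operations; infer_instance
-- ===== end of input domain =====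

-- B computes each query's share directly with divmod instead of A's one-by-one round-robin loop.

-- ===== PORT A =====
-- inner 'for query in queries' with the 'if additional_ops <= 0: break'
def pvPassA (ops : PySem.Dict String Int) (extra : Int) : List String → PySem.Dict String Int × Int
  | [] => (ops, extra)
  | q :: rest =>
      if extra ≤ 0 then (ops, extra)
      else pvPassA (ops.modify q 0 (· + 1)) (extra - 1) rest

-- the 'while additional_ops > 0' loop; fuel additional_ops.toNat suffices since each pass
-- over a nonempty queries list removes at least 1 from additional_ops (A diverges on
-- queries = [] with positive extra; Pre_ excludes that input)
def pvWhileA (queries : List String) : Nat → PySem.Dict String Int → Int → PySem.Dict String Int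
  | 0, ops, _ => ops
  | fuel + 1, ops, extra =>
      if 0 < extra then
        let p := pvPassA ops extra queries
        pvWhileA queries fuel p.1 p.2
      else ops

def distribute_operations (read_ratio : Int) (queries : List String) : List (String × Int) :=
  let operations := queries.foldl (fun d q => d.insert q (1 : Int)) PySem.Dict.empty
  let total_assigned_ops : Int := queries.length
  let additional_ops := read_ratio - total_assigned_ops
  (pvWhileA queries additional_ops.toNat operations additional_ops).items

-- ===== PORT B =====
-- 'for i, query in enumerate(queries): ops[query] = ops.get(query, 1) + q + (1 if i < r else 0)'
def pvBLoop (qv rv : Int) : Int → List String → PySem.Dict String Int → PySem.Dict String Int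
  | _, [], ops => ops
  | i, qy :: rest, ops =>
      pvBLoop qv rv (i + 1) rest (ops.insert qy (ops.getD qy 1 + qv + (if i < rv then 1 else 0)))

def distribute_operations_alt (read_ratio : Int) (queries : List String) : List (String × Int) :=
  if queries.length = 0 then [] else
  let n : Int := queries.length
  let extra := read_ratio - n
  let qr := if 0 < extra then (PySem.Int.floordiv extra n, PySem.Int.mod extra n) else ((0 : Int), (0 : Int))
  (pvBLoop qr.1 qr.2 0 queries PySem.Dict.empty).items

-- ===== PRECONDITION & SPEC =====
-- Pre_ excludes exactly the inputs where A never returns: on queries = [] with read_ratio > 0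
-- A's while loop spins forever (the for loop makes no progress).
def Pre_distribute_operations (read_ratio : Int) (queries : List String) : Prop :=
  queries = [] → read_ratio ≤ 0

instance (read_ratio : Int) (queries : List String) : Decidable (Pre_distribute_operations read_ratio queries) := by
  unfold Pre_distribute_operations; infer_instance

def pvWitness_distribute_operations : Int × List String := (7, ["a", "b", "c"])

def Spec_distribute_operations (read_ratio : Int) (queries : List String) (out : List (String × Int)) : Prop := out = distribute_operations_alt read_ratio queries
instance (read_ratio : Int) (queries : List String) (out : List (String × Int)) : Decidable (Spec_distribute_operations read_ratio queries out) := by unfold Spec_distribute_operations; infer_instance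

-- ===== CLAIM (what is proved, stated in full; the proofs are below) =====
def Claim_equal_distribute_operations : Prop := ∀ (read_ratio : Int) (queries : List String), Dom_distribute_operations read_ratio queries → Pre_distribute_operations read_ratio queries → Spec_distribute_operations read_ratio queries (distribute_operations read_ratio queries)

-- ===== LEMMAS AND PROOFS =====

-- per-position total number of extra operations position i receives when extra = e
def pvAmt (n e i : Int) : Int :=
  if 0 < e then PySem.Int.floordiv e n + (if i < PySem.Int.mod e n then 1 else 0) else 0

-- B's per-occurrence amount summed over the occurrences of k (positions from i0)
def pvSumB (qv rv : Int) (k : String) : List String → Int → Int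
  | [], _ => 0
  | q :: rest, i0 => (if q = k then qv + (if i0 < rv then 1 else 0) else 0) + pvSumB qv rv k rest (i0 + 1)

-- total extra operations received by key k over the occurrences of k in l (positions from i0)
def pvSum (n e : Int) (k : String) : List String → Int → Int
  | [], _ => 0
  | q :: rest, i0 => (if q = k then pvAmt n e i0 else 0) + pvSum n e k rest (i0 + 1)

theorem pvSum_nonpos (n e : Int) (k : String) (l : List String) (i0 : Int) (he : e ≤ 0) :
    pvSum n e k l i0 = 0 := by
  induction l generalizing i0 with
  | nil => rfl
  | cons q rest ih => simp [pvSum, pvAmt, ih, not_lt.mpr he]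

theorem pvAmt_step (n e i : Int) (hn : 0 < n) (he : 0 < e) (hi : 0 ≤ i) (hin : i < n) :
    pvAmt n e i = (if i < e then 1 else 0) + pvAmt n (e - min n e) i := by
  have hfd := PySem.Int.floordiv_eq_ediv_of_pos (a := e) hn
  have hmd := PySem.Int.mod_eq_emod_of_pos (a := e) hn
  have hz : pvAmt n 0 i = 0 := by simp [pvAmt]
  by_cases hne : n ≤ e
  · have hmin : min n e = n := min_eq_left hne
    have hie : i < e := lt_of_lt_of_le hin hne
    rcases hne.lt_or_eq with h1 | h1
    · have he' : 0 < e - n := by omega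
      have hfd' := PySem.Int.floordiv_eq_ediv_of_pos (a := e - n) hn
      have hmd' := PySem.Int.mod_eq_emod_of_pos (a := e - n) hn
      have h2 : (e - n) / n = e / n - 1 := by
        have h3 := Int.add_mul_ediv_right e (-1) (ne_of_gt hn)
        have h4 : e + -1 * n = e - n := by ring
        rw [h4] at h3; omega
      have h5 : (e - n) % n = e % n := Int.sub_emod_right e n
      rw [pvAmt, pvAmt, hmin, if_pos he, if_pos he', hfd, hmd, hfd', hmd', h2, h5, if_pos hie]
      ring
    · have h0 : e - min n e = 0 := by omega
      subst h1
      rw [h0, hz, pvAmt, if_pos he, hfd, hmd, Int.ediv_self (ne_of_gt hn), Int.emod_self,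
        if_pos hie, if_neg (by omega : ¬ i < (0 : Int))]
  · have hne' : e < n := by omega
    have h0 : e - min n e = 0 := by omega
    rw [h0, hz, pvAmt, if_pos he, hfd, hmd,
      Int.ediv_eq_zero_of_lt he.le hne', Int.emod_eq_of_lt he.le hne']
    ring

theorem pvSum_step_aux (n e : Int) (k : String) (hn0 : 0 < n) (he : 0 < e) :
    ∀ (l : List String) (i0 : Int), 0 ≤ i0 → i0 + l.length ≤ n →
      pvSum n e k l i0 =
        ((l.take (e - i0).toNat).count k : Int) + pvSum n (e - min n e) k l i0 := by
  intro l
  induction l with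
  | nil => intro i0 _ _; simp [pvSum]
  | cons q rest ih =>
    intro i0 h0 hlen
    have hin : i0 < n := by simp at hlen; omega
    have hstep := pvAmt_step n e i0 hn0 he h0 hin
    have ihr := ih (i0 + 1) (by omega) (by simp at hlen ⊢; omega)
    by_cases hie : i0 < e
    · have htake : (e - i0).toNat = (e - (i0 + 1)).toNat + 1 := by omega
      rw [pvSum, pvSum, ihr, htake, List.take_succ_cons, List.count_cons, hstep, if_pos hie]
      by_cases hq : q = k
      · simp [hq]; ring
      · have hb : (q == k) = false := by simp [hq]
        simp [hq, hb]
    · have htake : (e - i0).toNat = 0 := by omega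
      have htake' : (e - (i0 + 1)).toNat = 0 := by omega
      rw [pvSum, pvSum, ihr, htake, htake', hstep, if_neg hie]
      by_cases hq : q = k <;> simp [hq]

theorem pvSum_step (n e : Int) (k : String) (queries : List String)
    (hn : (queries.length : Int) = n) (hn0 : 0 < n) (he : 0 < e) :
    pvSum n e k queries 0 =
      ((queries.take e.toNat).count k : Int) + pvSum n (e - min n e) k queries 0 := by
  have := pvSum_step_aux n e k hn0 he queries 0 (le_refl 0) (by omega)
  simpa using this

theorem pvPassA_spec (l : List String) :
    ∀ (ops : PySem.Dict String Int) (e : Int), 0 ≤ e →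
      pvPassA ops e l =
        ((l.take e.toNat).foldl (fun d x => d.modify x 0 (· + 1)) ops,
          e - min (l.length : Int) e) := by
  induction l with
  | nil =>
    intro ops e he
    simp only [pvPassA, List.take_nil, List.foldl_nil, List.length_nil, Prod.mk.injEq]
    constructor
    · trivial
    · push_cast; omega
  | cons q rest ih =>
    intro ops e he
    rw [pvPassA]
    by_cases h0 : e ≤ 0
    · have he0 : e = 0 := le_antisymm h0 he
      subst he0
      simp only [if_pos (le_refl (0 : Int)), Int.toNat_zero, List.take_zero, List.foldl_nil,
        Prod.mk.injEq]
      constructor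
      · trivial
      · have : (0 : Int) ≤ ((q :: rest).length : Int) := by positivity
        omega
    · rw [if_neg h0]
      rw [ih _ (e - 1) (by omega)]
      have htake : e.toNat = (e - 1).toNat + 1 := by omega
      rw [htake, List.take_succ_cons, List.foldl_cons]
      simp only [Prod.mk.injEq, List.length_cons]
      constructor
      · trivial
      · push_cast; omega

theorem pvPassA_keys (l : List String) :
    ∀ (ops : PySem.Dict String Int) (e : Int), (∀ x ∈ l, x ∈ ops.keys) →
      (pvPassA ops e l).1.keys = ops.keys := by
  induction l with
  | nil => intro ops e _; rfl
  | cons q rest ih =>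
    intro ops e hmem
    rw [pvPassA]
    by_cases h : e ≤ 0
    · rw [if_pos h]
    · rw [if_neg h]
      have hc : ops.contains q = true :=
        (PySem.Dict.contains_iff_mem_keys _ _).mpr (hmem q List.mem_cons_self)
      have hk : (ops.modify q 0 (· + 1)).keys = ops.keys := by
        apply PySem.Dict.keys_insert_of_contains; exact hc
      rw [ih _ _ (by intro x hx; rw [hk]; exact hmem x (List.mem_cons_of_mem _ hx)), hk]

theorem pvWhileA_getD (queries : List String) (hq : queries ≠ []) :
    ∀ (fuel : Nat) (e : Int) (d : PySem.Dict String Int) (k : String), e.toNat ≤ fuel →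
      (pvWhileA queries fuel d e).getD k 0 =
        d.getD k 0 + pvSum (queries.length : Int) e k queries 0 := by
  intro fuel
  induction fuel with
  | zero =>
    intro e d k hf
    have he : e ≤ 0 := by omega
    rw [pvWhileA, pvSum_nonpos _ _ _ _ _ he]; ring
  | succ fuel ih =>
    intro e d k hf
    rw [pvWhileA]
    by_cases he : 0 < e
    · rw [if_pos he]
      have hn0 : 0 < (queries.length : Int) := by
        cases queries with
        | nil => exact absurd rfl hq
        | cons a l => simp
      simp only [pvPassA_spec queries d e he.le]
      have hmin1 : 1 ≤ min ((queries.length : Int)) e := by omega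
      have hf' : (e - min ((queries.length : Int)) e).toNat ≤ fuel := by omega
      rw [ih _ _ _ hf', PySem.Dict.getD_foldl_modify_add_one,
        pvSum_step ((queries.length : Int)) e k queries rfl hn0 he]
      ring
    · rw [if_neg he, pvSum_nonpos _ _ _ _ _ (by omega)]; ring

theorem pvWhileA_keys (queries : List String) :
    ∀ (fuel : Nat) (e : Int) (d : PySem.Dict String Int), (∀ x ∈ queries, x ∈ d.keys) →
      (pvWhileA queries fuel d e).keys = d.keys := by
  intro fuel
  induction fuel with
  | zero => intro e d _; rfl
  | succ fuel ih =>
    intro e d hmem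
    rw [pvWhileA]
    by_cases he : 0 < e
    · rw [if_pos he]
      simp only []
      have hp := pvPassA_keys queries d e hmem
      rw [ih _ _ (by intro x hx; rw [hp]; exact hmem x hx), hp]
    · rw [if_neg he]

theorem pv_getD_one_eq_zero (d : PySem.Dict String Int) (k : String)
    (h : d.contains k = true) : d.getD k 1 = d.getD k 0 := by
  rcases hg : d.get? k with _ | v
  · rw [PySem.Dict.contains_eq_isSome_get?, hg] at h; simp at h
  · rw [PySem.Dict.getD_eq_get?_getD, PySem.Dict.getD_eq_get?_getD, hg]
    rfl

theorem pvBLoop_getD (qv rv : Int) :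
    ∀ (l : List String) (i0 : Int) (d : PySem.Dict String Int) (k : String),
      (pvBLoop qv rv i0 l d).getD k 0 =
        if k ∈ l ∧ d.contains k = false then 1 + pvSumB qv rv k l i0
        else d.getD k 0 + pvSumB qv rv k l i0 := by
  intro l
  induction l with
  | nil => intro i0 d k; simp [pvBLoop, pvSumB]
  | cons q rest ih =>
    intro i0 d k
    rw [pvBLoop, ih, pvSumB]
    by_cases hk : k = q
    · subst hk
      have hc : (d.insert k (d.getD k 1 + qv + (if i0 < rv then 1 else 0))).contains k = true := by
        apply PySem.Dict.contains_insert_self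
      have hgi : (d.insert k (d.getD k 1 + qv + (if i0 < rv then 1 else 0))).getD k 0 =
          d.getD k 1 + qv + (if i0 < rv then 1 else 0) := by
        apply PySem.Dict.getD_insert_self
      rw [if_neg (by simp [hc]), hgi]
      by_cases hd : d.contains k
      · rw [if_neg (by simp [hd] : ¬ (k ∈ k :: rest ∧ d.contains k = false)),
          pv_getD_one_eq_zero d k hd, if_pos rfl]
        ring
      · have hd' : d.contains k = false := by simpa using hd
        have hg0 : d.getD k 1 = 1 := by apply PySem.Dict.getD_of_not_contains; exact hd'
        rw [if_pos (by simp [hd'] : (k ∈ k :: rest ∧ d.contains k = false)), hg0, if_pos rfl]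
        ring
    · have hqk : ¬ (q = k) := fun h => hk h.symm
      have hg : (d.insert q (d.getD q 1 + qv + (if i0 < rv then 1 else 0))).getD k 0 =
          d.getD k 0 := by apply PySem.Dict.getD_insert_of_ne; exact hk
      have hcs : (d.insert q (d.getD q 1 + qv + (if i0 < rv then 1 else 0))).contains k =
          d.contains k := by
        rw [PySem.Dict.contains_insert]; simp [hk]
      rw [hg, hcs]
      simp only [List.mem_cons, hk, false_or, hqk, if_false]
      split_ifs <;> ring

theorem pvBLoop_keys (qv rv : Int) :
    ∀ (l : List String) (i0 : Int) (d : PySem.Dict String Int),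
      (pvBLoop qv rv i0 l d).keys = PySem.Set.update d.keys l := by
  intro l
  induction l with
  | nil => intro i0 d; rfl
  | cons q rest ih =>
    intro i0 d
    rw [pvBLoop, ih, PySem.Set.update_cons]
    congr 1
    by_cases h : d.contains q
    · have hm : q ∈ d.keys := (PySem.Dict.contains_iff_mem_keys _ _).mp h
      have h1 : (d.insert q (d.getD q 1 + qv + (if i0 < rv then 1 else 0))).keys = d.keys := by
        apply PySem.Dict.keys_insert_of_contains; exact h
      have h2 : PySem.Set.add d.keys q = d.keys := by apply PySem.Set.add_of_mem; exact hm
      rw [h1, h2]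
    · have h' : d.contains q = false := by simpa using h
      have hm : q ∉ d.keys := fun hm => by
        simp [(PySem.Dict.contains_iff_mem_keys _ _).mpr hm] at h'
      have h1 : (d.insert q (d.getD q 1 + qv + (if i0 < rv then 1 else 0))).keys =
          d.keys ++ [q] := by apply PySem.Dict.keys_insert_of_not_contains; exact h'
      have h2 : PySem.Set.add d.keys q = d.keys ++ [q] := by
        apply PySem.Set.add_of_not_mem; exact hm
      rw [h1, h2]

theorem pvSumB_eq (qv rv n e : Int) (k : String)
    (h1 : 0 < e → qv = PySem.Int.floordiv e n ∧ rv = PySem.Int.mod e n)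
    (h2 : ¬ 0 < e → qv = 0 ∧ rv = 0) :
    ∀ (l : List String) (i0 : Int), 0 ≤ i0 → pvSumB qv rv k l i0 = pvSum n e k l i0 := by
  intro l
  induction l with
  | nil => intro i0 _; rfl
  | cons q rest ih =>
    intro i0 hi0
    rw [pvSumB, pvSum, ih (i0 + 1) (by omega)]
    congr 1
    by_cases he : 0 < e
    · obtain ⟨hq, hr⟩ := h1 he
      rw [hq, hr, pvAmt, if_pos he]
    · obtain ⟨hq, hr⟩ := h2 he
      rw [hq, hr, pvAmt, if_neg he, if_neg (by omega : ¬ i0 < (0 : Int))]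
      simp

theorem pvInit_getD (l : List String) :
    ∀ (d : PySem.Dict String Int) (k : String),
      (l.foldl (fun d q => d.insert q (1 : Int)) d).getD k 0 = if k ∈ l then 1 else d.getD k 0 := by
  induction l with
  | nil => intro d k; simp
  | cons q rest ih =>
    intro d k
    rw [List.foldl_cons, ih]
    by_cases hk : k ∈ rest
    · simp [hk]
    · by_cases he : k = q
      · subst he
        have h1 : (d.insert k (1 : Int)).getD k 0 = 1 := by apply PySem.Dict.getD_insert_self
        simp [hk, h1]
      · have h1 : (d.insert q (1 : Int)).getD k 0 = d.getD k 0 := by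
          apply PySem.Dict.getD_insert_of_ne; exact he
        simp [hk, he, h1]

-- ===== VERDICT (by name: the statement is the Claim_ definition above) =====
theorem distribute_operations_spec : Claim_equal_distribute_operations := by
  intro rr queries _ hpre
  unfold Spec_distribute_operations
  cases queries with
  | nil =>
    have hrr : rr ≤ 0 := hpre rfl
    simp [distribute_operations, distribute_operations_alt]
    rw [(by omega : rr.toNat = 0)]
    rfl
  | cons q0 rest =>
    set queries := q0 :: rest with hqs
    have hq : queries ≠ [] := by simp [hqs]
    have hlen : queries.length ≠ 0 := by simp [hqs]
    have hn0 : 0 < (queries.length : Int) := by simp [hqs]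
    set n : Int := (queries.length : Int) with hn
    set e : Int := rr - n with he
    set d0 := queries.foldl (fun d q => d.insert q (1 : Int)) PySem.Dict.empty with hd0
    set qr := if 0 < e then (PySem.Int.floordiv e n, PySem.Int.mod e n) else ((0 : Int), (0 : Int))
      with hqr
    have hA : distribute_operations rr queries = (pvWhileA queries e.toNat d0 e).items := rfl
    have hB : distribute_operations_alt rr queries =
        (pvBLoop qr.1 qr.2 0 queries PySem.Dict.empty).items := by
      rw [distribute_operations_alt, if_neg hlen]
    rw [hA, hB]
    have hd0k : d0.keys = PySem.Set.ofList queries := by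
      rw [hd0, PySem.Dict.keys_foldl_insert, PySem.Dict.keys_empty, PySem.Set.update_nil_left]
    have hmem : ∀ x ∈ queries, x ∈ d0.keys := by
      intro x hx; rw [hd0k]; exact (PySem.Set.mem_ofList _ _).mpr hx
    have hkA : (pvWhileA queries e.toNat d0 e).keys = PySem.Set.ofList queries := by
      rw [pvWhileA_keys queries e.toNat e d0 hmem, hd0k]
    have hkB : (pvBLoop qr.1 qr.2 0 queries PySem.Dict.empty).keys = PySem.Set.ofList queries := by
      rw [pvBLoop_keys, PySem.Dict.keys_empty, PySem.Set.update_nil_left]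
    have hndA : (pvWhileA queries e.toNat d0 e).keys.Nodup := by
      rw [hkA]; exact PySem.Set.nodup_ofList queries
    have hndB : (pvBLoop qr.1 qr.2 0 queries PySem.Dict.empty).keys.Nodup := by
      rw [hkB]; exact PySem.Set.nodup_ofList queries
    rw [PySem.Dict.items_eq_map_keys _ hndA 0, PySem.Dict.items_eq_map_keys _ hndB 0, hkA, hkB]
    apply List.map_congr_left
    intro k hkmem
    have hkq : k ∈ queries := (PySem.Set.mem_ofList _ _).mp hkmem
    have hgA : (pvWhileA queries e.toNat d0 e).getD k 0 = 1 + pvSum n e k queries 0 := by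
      rw [pvWhileA_getD queries hq e.toNat e d0 k (le_refl _), hd0, pvInit_getD, if_pos hkq, ← hn]
    have hce : (PySem.Dict.empty : PySem.Dict String Int).contains k = false := by
      rw [PySem.Dict.contains_empty]
    have hgB : (pvBLoop qr.1 qr.2 0 queries PySem.Dict.empty).getD k 0 =
        1 + pvSum n e k queries 0 := by
      rw [pvBLoop_getD, if_pos ⟨hkq, hce⟩,
        pvSumB_eq qr.1 qr.2 n e k
          (fun hp => by rw [hqr, if_pos hp]; exact ⟨rfl, rfl⟩)
          (fun hp => by rw [hqr, if_neg hp]; exact ⟨rfl, rfl⟩)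
          queries 0 (le_refl 0)]
    rw [hgA, hgB]
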